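-- pv_equiv track=rewrite | github.com/andrewfavor95/polydiff | inference/utils.py | get_grouped_regions
-- ===== SOURCE A (Python) =====
-- def get_grouped_regions(tensor, repeat_length):
--     true_regions = []
--     start_idx = None
--     prev_group = None
--
--     for i, value in enumerate(tensor):
--         if value:
--             if start_idx is None:
--                 start_idx = i
--         else:
--             if start_idx is not None:
--                 end_idx = i
--                 group = (start_idx // repeat_length, end_idx // repeat_length)
--                 if group != prev_group:
--                     true_regions.append([])
--                 true_regions[-1].append((start_idx, end_idx))
--                 start_idx = None
--                 prev_group = group
--
--     if start_idx is not None: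
--         end_idx = len(tensor)
--         group = (start_idx // repeat_length, end_idx // repeat_length)
--         if group != prev_group:
--             true_regions.append([])
--         true_regions[-1].append((start_idx, end_idx))
--
--     return true_regions
-- ===== SOURCE B (Python) =====
-- def get_grouped_regions(tensor, repeat_length):
--     # Pass 1: collect all maximal true runs as (start, end) tuples.
--     runs = []
--     start = None
--     for i, value in enumerate(tensor):
--         if value:
--             if start is None:
--                 start = i
--         else:
--             if start is not None:
--                 runs.append((start, i))
--                 start = None
--     if start is not None:
--         runs.append((start, len(tensor)))
--
--     def key(r):
--         return (r[0] // repeat_length, r[1] // repeat_length)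
--
--     # Pass 2: chunk consecutive runs with equal keys (groupby-style).
--     out = []
--     i = 0
--     n = len(runs)
--     while i < n:
--         j = i + 1
--         while j < n and key(runs[j]) == key(runs[i]):
--             j += 1
--         out.append(runs[i:j])
--         i = j
--     return out
-- ===== Notes on version B (the rewrite author's own statement) =====
-- stated objective: simpler
-- what changed: A's single interleaved detect-and-bucket loop with append-to-last-sublist and prev-group state is split into two plain passes: one pass extracting maximal true runs, then a groupby-style chunking of consecutive runs with equal (start//repeat_length, end//repeat_length) keys.
import Mathlib
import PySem

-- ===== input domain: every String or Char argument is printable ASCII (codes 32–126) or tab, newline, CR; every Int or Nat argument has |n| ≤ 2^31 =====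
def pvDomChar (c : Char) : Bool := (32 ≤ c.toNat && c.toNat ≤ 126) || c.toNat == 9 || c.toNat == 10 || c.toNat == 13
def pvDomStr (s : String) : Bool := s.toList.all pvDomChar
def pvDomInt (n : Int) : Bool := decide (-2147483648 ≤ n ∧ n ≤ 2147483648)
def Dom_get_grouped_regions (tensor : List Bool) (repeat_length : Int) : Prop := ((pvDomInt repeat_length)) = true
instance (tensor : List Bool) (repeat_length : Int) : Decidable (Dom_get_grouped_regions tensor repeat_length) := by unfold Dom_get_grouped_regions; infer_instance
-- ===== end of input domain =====

-- B splits A's interleaved detect-and-bucket loop into a run-extraction pass followed by a groupby-style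
-- chunking pass (objective: simpler); equal return value proved for repeat_length ≠ 0 (and trivially when no run exists).


-- ===== PORT A =====
-- true_regions[-1].append(x): append x to the last sublist ([] stays [] — in A that point is unreachable,
-- since the branch that reaches it always has a last sublist).
def pvAppendLast : List (List (Int × Int)) → (Int × Int) → List (List (Int × Int))
  | [], _ => []
  | [l], x => [l ++ [x]]
  | l :: ls, x => l :: pvAppendLast ls x

-- the for-loop of A: state (true_regions, start_idx, prev_group), i the running enumerate index
def pvAgo (rl : Int) : List Bool → Int →
    (List (List (Int × Int)) × Option Int × Option (Int × Int)) →
    (List (List (Int × Int)) × Option Int × Option (Int × Int))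
  | [], _, st => st
  | v :: vs, i, (acc, start, prev) =>
    if v then
      pvAgo rl vs (i + 1) (acc, (if start.isNone then some i else start), prev)
    else
      match start with
      | none => pvAgo rl vs (i + 1) (acc, none, prev)
      | some s =>
        let g := (PySem.Int.floordiv s rl, PySem.Int.floordiv i rl)
        let acc' := if some g ≠ prev then acc ++ [[]] else acc
        pvAgo rl vs (i + 1) (pvAppendLast acc' (s, i), none, some g)

def get_grouped_regions (tensor : List Bool) (repeat_length : Int) : List (List (Int × Int)) :=
  match pvAgo repeat_length tensor 0 ([], none, none) with
  | (acc, none, _) => acc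
  | (acc, some s, prev) =>
    let g := (PySem.Int.floordiv s repeat_length,
              PySem.Int.floordiv (tensor.length : Int) repeat_length)
    let acc' := if some g ≠ prev then acc ++ [[]] else acc
    pvAppendLast acc' (s, (tensor.length : Int))

-- ===== PORT B =====
-- pass 1 of B: collect all maximal true runs as (start, end); i is the running index,
-- at exhaustion the index equals len(tensor), closing a trailing open run
def pvRuns : List Bool → Int → Option Int → List (Int × Int)
  | [], _, none => []
  | [], i, some s => [(s, i)]
  | v :: vs, i, start =>
    if v then
      pvRuns vs (i + 1) (if start.isNone then some i else start)
    else
      match start with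
      | none => pvRuns vs (i + 1) none
      | some s => (s, i) :: pvRuns vs (i + 1) none

def pvKey (rl : Int) (r : Int × Int) : Int × Int :=
  (PySem.Int.floordiv r.1 rl, PySem.Int.floordiv r.2 rl)

-- pass 2 of B: the outer while loop; the inner `while j < n and key(runs[j]) == key(runs[i])`
-- together with the slice runs[i:j] is the takeWhile/dropWhile pair on the remaining runs
def pvGroup (rl : Int) : List (Int × Int) → List (List (Int × Int))
  | [] => []
  | r :: rs =>
    (r :: rs.takeWhile (fun r' => pvKey rl r' == pvKey rl r)) ::
      pvGroup rl (rs.dropWhile (fun r' => pvKey rl r' == pvKey rl r))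
  termination_by rs => rs.length
  decreasing_by
    simp only [List.length_cons]
    exact Nat.lt_succ_of_le (List.length_dropWhile_le _ _)

def get_grouped_regions_alt (tensor : List Bool) (repeat_length : Int) : List (List (Int × Int)) :=
  pvGroup repeat_length (pvRuns tensor 0 none)

-- ===== PRECONDITION & SPEC =====
-- Pre_ excludes exactly the inputs on which Python A raises ZeroDivisionError:
-- repeat_length == 0 while the tensor contains at least one True (so a run's group is computed).
def Pre_get_grouped_regions (tensor : List Bool) (repeat_length : Int) : Prop :=
  repeat_length ≠ 0 ∨ ¬ (true ∈ tensor)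
instance (tensor : List Bool) (repeat_length : Int) : Decidable (Pre_get_grouped_regions tensor repeat_length) := by unfold Pre_get_grouped_regions; infer_instance
def pvWitness_get_grouped_regions : List Bool × Int := ([true, false, true, true], 2)

def Spec_get_grouped_regions (tensor : List Bool) (repeat_length : Int) (out : List (List (Int × Int))) : Prop := out = get_grouped_regions_alt tensor repeat_length
instance (tensor : List Bool) (repeat_length : Int) (out : List (List (Int × Int))) : Decidable (Spec_get_grouped_regions tensor repeat_length out) := by unfold Spec_get_grouped_regions; infer_instance

-- ===== CLAIM (what is proved, stated in full; the proofs are below) =====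
def Claim_equal_get_grouped_regions : Prop := ∀ (tensor : List Bool) (repeat_length : Int), Dom_get_grouped_regions tensor repeat_length → Pre_get_grouped_regions tensor repeat_length → Spec_get_grouped_regions tensor repeat_length (get_grouped_regions tensor repeat_length)

-- ===== LEMMAS AND PROOFS =====

-- A's grouping step as a fold over the run list (the bridge between the two programs)
def pvFoldGroup (rl : Int) :
    List (List (Int × Int)) → Option (Int × Int) → List (Int × Int) → List (List (Int × Int))
  | acc, _, [] => acc
  | acc, prev, r :: rs =>
    let g := pvKey rl r
    let acc' := if some g ≠ prev then acc ++ [[]] else acc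
    pvFoldGroup rl (pvAppendLast acc' r) (some g) rs

-- applying A's trailing-run epilogue with end index n to a loop state
def pvAfin (rl n : Int) :
    (List (List (Int × Int)) × Option Int × Option (Int × Int)) → List (List (Int × Int))
  | (acc, none, _) => acc
  | (acc, some s, prev) =>
    let g := (PySem.Int.floordiv s rl, PySem.Int.floordiv n rl)
    let acc' := if some g ≠ prev then acc ++ [[]] else acc
    pvAppendLast acc' (s, n)

theorem pvAgo_spec (rl : Int) (vs : List Bool) :
    ∀ (i : Int) (acc : List (List (Int × Int))) (start : Option Int)
      (prev : Option (Int × Int)),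
      pvAfin rl (i + vs.length) (pvAgo rl vs i (acc, start, prev)) =
        pvFoldGroup rl acc prev (pvRuns vs i start) := by
  induction vs with
  | nil =>
    intro i acc start prev
    cases start with
    | none => simp only [pvAgo, pvRuns, pvAfin, pvFoldGroup]
    | some s =>
      simp only [pvAgo, pvRuns, pvAfin, pvFoldGroup, pvKey, List.length_nil,
        Nat.cast_zero, add_zero]
      rfl
  | cons v vs ih =>
    intro i acc start prev
    have harith : i + ((vs.length : Int) + 1) = (i + 1) + vs.length := by ring
    cases v with
    | true =>
      simp only [pvAgo, pvRuns, List.length_cons, Nat.cast_add, Nat.cast_one,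
        if_pos trivial, Bool.true_eq_false, ite_true]
      rw [harith]
      exact ih (i + 1) acc (if start.isNone then some i else start) prev
    | false =>
      cases start with
      | none =>
        simp only [pvAgo, pvRuns, List.length_cons, Nat.cast_add, Nat.cast_one,
          Bool.false_eq_true, ite_false]
        rw [harith]
        exact ih (i + 1) acc none prev
      | some s =>
        simp only [pvAgo, pvRuns, pvFoldGroup, pvKey, List.length_cons,
          Nat.cast_add, Nat.cast_one, Bool.false_eq_true, ite_false]
        rw [harith]
        exact ih (i + 1) _ none _

-- appending to the last sublist of a non-empty list
theorem pvAppendLast_snoc (acc : List (List (Int × Int))) (cur : List (Int × Int))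
    (x : Int × Int) : pvAppendLast (acc ++ [cur]) x = acc ++ [cur ++ [x]] := by
  induction acc with
  | nil => rfl
  | cons a acc ih =>
    cases acc with
    | nil => simp [pvAppendLast]
    | cons b acc => simpa [pvAppendLast] using ih

-- open-group characterisation of pvFoldGroup against pvGroup
theorem pvFoldGroup_open (rl : Int) (rs : List (Int × Int)) :
    ∀ (acc : List (List (Int × Int))) (cur : List (Int × Int)) (g : Int × Int),
      pvFoldGroup rl (acc ++ [cur]) (some g) rs =
        acc ++ (cur ++ rs.takeWhile (fun r' => pvKey rl r' == g)) ::
          pvGroup rl (rs.dropWhile (fun r' => pvKey rl r' == g)) := by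
  induction rs with
  | nil => intro acc cur g; simp [pvFoldGroup, pvGroup]
  | cons r rs ih =>
    intro acc cur g
    by_cases h : pvKey rl r = g
    · simp only [pvFoldGroup]
      rw [if_neg (by simp [h]), pvAppendLast_snoc, h, ih acc (cur ++ [r]) g,
        List.takeWhile_cons, List.dropWhile_cons]
      simp [h]
    · simp only [pvFoldGroup]
      rw [if_pos (by simp [h]), pvAppendLast_snoc]
      have := ih (acc ++ [cur]) [r] (pvKey rl r)
      rw [List.append_assoc] at this
      rw [show acc ++ [cur] ++ [[] ++ [r]] = acc ++ ([cur] ++ [[r]]) by simp, this,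
        List.takeWhile_cons, List.dropWhile_cons]
      have hgr : pvGroup rl (r :: rs) =
          (r :: rs.takeWhile (fun r' => pvKey rl r' == pvKey rl r)) ::
            pvGroup rl (rs.dropWhile (fun r' => pvKey rl r' == pvKey rl r)) := by
        rw [pvGroup]
      simp [h, hgr]

theorem pvFoldGroup_closed (rl : Int) (rs : List (Int × Int)) :
    pvFoldGroup rl [] none rs = pvGroup rl rs := by
  cases rs with
  | nil => simp [pvFoldGroup, pvGroup]
  | cons r rs =>
    simp only [pvFoldGroup]
    rw [if_pos (by simp)]
    have := pvFoldGroup_open rl rs [] [r] (pvKey rl r)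
    simp only [List.nil_append] at this
    rw [show pvAppendLast ([] ++ [[]]) r = [] ++ [[r]] by rfl]
    simp only [List.nil_append]
    rw [this, pvGroup]
    simp

theorem get_grouped_regions_eq_fin (tensor : List Bool) (rl : Int) :
    get_grouped_regions tensor rl =
      pvAfin rl (tensor.length : Int) (pvAgo rl tensor 0 ([], none, none)) := by
  unfold get_grouped_regions pvAfin
  rcases pvAgo rl tensor 0 ([], none, none) with ⟨acc, start, prev⟩
  cases start <;> rfl

-- ===== VERDICT (by name: the statement is the Claim_ definition above) =====
theorem get_grouped_regions_spec : Claim_equal_get_grouped_regions := by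
  intro tensor rl _ _
  unfold Spec_get_grouped_regions get_grouped_regions_alt
  rw [get_grouped_regions_eq_fin]
  have h := pvAgo_spec rl tensor 0 [] none none
  rw [zero_add] at h
  rw [h, pvFoldGroup_closed]
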